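-- pv_equiv track=rewrite | github.com/yue-su/algo | array/fellow_difficulty_assignment.py | assignAlgorithms
-- ===== SOURCE A (Python) =====
-- def assignAlgorithms(fellows: list[int]) -> list[int]:
--     res = [1]*len(fellows)
--     for i in range(1, len(fellows)):
--         if fellows[i] > fellows[i - 1]:
--             res[i] = res[i-1] + 1
--         elif fellows[i] == fellows[i - 1]:
--             res[i] = res[i - 1]
--         else:
--             res[i] = 1
--
--     for i in range(len(fellows) - 2, -1, -1):
--         if fellows[i] > fellows[i + 1]:
--             res[i] = max(res[i], res[i+1] + 1)
--         elif fellows[i] == fellows[i + 1]: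
--             res[i] = max(res[i], res[i + 1])
--         else:
--             res[i] = max(res[i], 1)
--
--     return res
-- ===== SOURCE B (Python) =====
-- def assignAlgorithms(fellows: list[int]) -> list[int]:
--     n = len(fellows)
--     # indices where a new run of equal adjacent values begins
--     starts = [i for i in range(n) if i == 0 or fellows[i] != fellows[i - 1]]
--     m = len(starts)
--     memo = {}
--
--     def level(k):
--         # level of run k; recursion only descends to strictly smaller-valued neighbor runs
--         if k not in memo:
--             s = starts[k]
--             e = starts[k + 1] - 1 if k + 1 < m else n - 1
--             v = 1
--             if s > 0 and fellows[s - 1] < fellows[s]: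
--                 v = level(k - 1) + 1
--             if e + 1 < n and fellows[e + 1] < fellows[e]:
--                 v = max(v, level(k + 1) + 1)
--             memo[k] = v
--         return memo[k]
--
--     out = []
--     k = -1
--     for i in range(n):
--         if i == 0 or fellows[i] != fellows[i - 1]:
--             k += 1
--         out.append(level(k))
--     return out
-- ===== Notes on version B (the rewrite author's own statement) =====
-- stated objective: alternative
-- what changed: A runs two in-place directional candy passes over one mutable array and combines them with max; B compresses the list into maximal runs of equal adjacent values and computes each run's level by memoized recursion that descends only to strictly smaller-valued neighbor runs (no directional rating passes).
import Mathlib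
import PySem

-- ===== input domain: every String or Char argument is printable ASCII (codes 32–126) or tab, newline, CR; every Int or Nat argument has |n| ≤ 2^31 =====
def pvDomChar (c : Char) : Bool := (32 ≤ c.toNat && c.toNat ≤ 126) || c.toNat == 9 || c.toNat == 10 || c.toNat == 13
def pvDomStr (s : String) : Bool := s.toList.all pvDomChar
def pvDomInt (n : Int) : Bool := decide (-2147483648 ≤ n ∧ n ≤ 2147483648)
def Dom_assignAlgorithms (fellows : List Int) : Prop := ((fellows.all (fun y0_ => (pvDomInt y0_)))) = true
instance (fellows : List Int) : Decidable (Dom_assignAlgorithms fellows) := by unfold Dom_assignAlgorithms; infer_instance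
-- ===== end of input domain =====

-- B replaces A's two in-place directional passes over one mutable array by run-compression of
-- equal adjacent values plus recursion on the value order of neighbor runs (alternative algorithm).

-- ===== PORT A =====
-- all indices touched by A's loops are in range, so pyGetD/pySetD are exact here
def fwdStep (f : List Int) (res : List Int) (i : Int) : List Int :=
  if PySem.List.pyGetD f i 0 > PySem.List.pyGetD f (i - 1) 0 then
    PySem.List.pySetD res i (PySem.List.pyGetD res (i - 1) 0 + 1)
  else if PySem.List.pyGetD f i 0 = PySem.List.pyGetD f (i - 1) 0 then
    PySem.List.pySetD res i (PySem.List.pyGetD res (i - 1) 0)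
  else
    PySem.List.pySetD res i 1

def bwdStep (f : List Int) (res : List Int) (i : Int) : List Int :=
  if PySem.List.pyGetD f i 0 > PySem.List.pyGetD f (i + 1) 0 then
    PySem.List.pySetD res i (max (PySem.List.pyGetD res i 0) (PySem.List.pyGetD res (i + 1) 0 + 1))
  else if PySem.List.pyGetD f i 0 = PySem.List.pyGetD f (i + 1) 0 then
    PySem.List.pySetD res i (max (PySem.List.pyGetD res i 0) (PySem.List.pyGetD res (i + 1) 0))
  else
    PySem.List.pySetD res i (max (PySem.List.pyGetD res i 0) 1)

def assignAlgorithms (fellows : List Int) : List Int :=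
  let n : Int := fellows.length
  let res0 := List.replicate fellows.length (1 : Int)
  let res1 := (PySem.List.pyRange 1 n 1).foldl (fwdStep fellows) res0
  (PySem.List.pyRange (n - 2) (-1) (-1)).foldl (bwdStep fellows) res1

-- ===== PORT B =====
-- Source B's start test `i == 0 or fellows[i] != fellows[i-1]` (all accesses in range, getD exact)
def isStart (f : List Int) (i : Nat) : Bool := i == 0 || decide (f.getD i 0 ≠ f.getD (i - 1) 0)

-- Source B's `starts = [i for i in range(n) if i == 0 or fellows[i] != fellows[i-1]]`
def startsOf (f : List Int) : List Nat := (List.range f.length).filter (fun i => isStart f i)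

-- Source B's recursive `level(k)` (memo dropped: pure function; fuel = number of runs, shown sufficient
-- in the proofs below since each recursive call descends to a strictly smaller-valued run)
def levelF (f : List Int) (starts : List Nat) : Nat → Nat → Int
  | 0, _ => 1
  | fuel + 1, k =>
    let s := starts.getD k 0
    let e := if k + 1 < starts.length then starts.getD (k + 1) 0 - 1 else f.length - 1
    let v : Int :=
      if 0 < s ∧ f.getD (s - 1) 0 < f.getD s 0 then levelF f starts fuel (k - 1) + 1 else 1
    if e + 1 < f.length ∧ f.getD (e + 1) 0 < f.getD e 0 then
      max v (levelF f starts fuel (k + 1) + 1)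
    else v

-- Source B's output loop: the Int counter k starts at -1 and is ≥ 0 whenever level(k) is called
-- (i = 0 is always a start), so k.toNat is exact
def assignAlgorithms_alt (fellows : List Int) : List Int :=
  let starts := startsOf fellows
  ((List.range fellows.length).foldl
    (fun (st : Int × List Int) i =>
      let k : Int := if isStart fellows i then st.1 + 1 else st.1
      (k, st.2 ++ [levelF fellows starts starts.length k.toNat]))
    ((-1 : Int), ([] : List Int))).2

-- ===== PRECONDITION & SPEC =====
def Spec_assignAlgorithms (fellows : List Int) (out : List Int) : Prop := out = assignAlgorithms_alt fellows
instance (fellows : List Int) (out : List Int) : Decidable (Spec_assignAlgorithms fellows out) := by unfold Spec_assignAlgorithms; infer_instance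

-- ===== CLAIM (what is proved, stated in full; the proofs are below) =====
def Claim_equal_assignAlgorithms : Prop := ∀ (fellows : List Int), Dom_assignAlgorithms fellows → Spec_assignAlgorithms fellows (assignAlgorithms fellows)

-- ===== LEMMAS AND PROOFS =====

-- ---- characterisation of A: left/right run values ----
def scanStep (prev : Option Int) (cur : Int) (x : Int) : Int :=
  match prev with
  | some p => if x > p then cur + 1 else if x = p then cur else 1
  | none => 1

def scanList : Option Int → Int → List Int → List Int
  | _, _, [] => []
  | prev, cur, x :: xs =>
    let c := scanStep prev cur x
    c :: scanList (some x) c xs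

def LG (f : List Int) (j : Nat) : Int := (scanList none 0 f).getD j 0
def RG (f : List Int) (j : Nat) : Int := ((scanList none 0 f.reverse).reverse).getD j 0
def buildL (f : List Int) (k : Nat) : List Int :=
  (List.range f.length).map (fun j => if j < k then LG f j else 1)
def buildM (f : List Int) (t : Nat) : List Int :=
  (List.range f.length).map (fun j => if j < t then LG f j else max (LG f j) (RG f j))

theorem scan_length (xs : List Int) : ∀ p c, (scanList p c xs).length = xs.length := by
  induction xs with
  | nil => intro p c; simp [scanList]
  | cons x xs ih => intro p c; simp [scanList, ih]

theorem scan_pos' (xs : List Int) : ∀ p c, 1 ≤ c → ∀ v ∈ scanList p c xs, 1 ≤ v := by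
  induction xs with
  | nil => intro p c _ v hv; simp [scanList] at hv
  | cons x xs ih =>
    intro p c hc v hv
    simp only [scanList, List.mem_cons] at hv
    have hstep : 1 ≤ scanStep p c x := by
      cases p with
      | none => simp [scanStep]
      | some p => simp only [scanStep]; split_ifs <;> omega
    rcases hv with h | h
    · exact le_of_le_of_eq hstep h.symm
    · exact ih (some x) _ hstep v h

theorem scan_pos (xs : List Int) (v : Int) (hv : v ∈ scanList none 0 xs) : 1 ≤ v := by
  cases xs with
  | nil => simp [scanList] at hv
  | cons x xs =>
    simp only [scanList, scanStep, List.mem_cons] at hv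
    rcases hv with h | h
    · omega
    · exact scan_pos' xs (some x) 1 le_rfl v h

theorem scan_get_zero (xs : List Int) (h : xs ≠ []) : (scanList none 0 xs).getD 0 0 = 1 := by
  cases xs with
  | nil => simp at h
  | cons x xs => simp [scanList, scanStep]

theorem scan_get_succ (xs : List Int) : ∀ p c (i : Nat), i + 1 < xs.length →
    (scanList p c xs).getD (i + 1) 0 =
      (if xs.getD (i + 1) 0 > xs.getD i 0 then (scanList p c xs).getD i 0 + 1
       else if xs.getD (i + 1) 0 = xs.getD i 0 then (scanList p c xs).getD i 0 else 1) := by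
  induction xs with
  | nil => intro p c i h; simp at h
  | cons x xs ih =>
    intro p c i h
    cases xs with
    | nil => simp at h
    | cons y ys =>
      cases i with
      | zero => simp [scanList, scanStep]
      | succ i =>
        have h' : i + 1 < (y :: ys).length := by simpa using h
        have := ih (some x) (scanStep p c x) i h'
        simpa [scanList] using this

theorem LG_pos (f : List Int) (j : Nat) (hj : j < f.length) : 1 ≤ LG f j := by
  unfold LG
  have hl : j < (scanList none 0 f).length := by rw [scan_length]; exact hj
  rw [List.getD_eq_getElem _ _ hl]
  exact scan_pos f _ (List.getElem_mem hl)

theorem RG_pos (f : List Int) (j : Nat) (hj : j < f.length) : 1 ≤ RG f j := by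
  unfold RG
  have hl : j < ((scanList none 0 f.reverse).reverse).length := by
    rw [List.length_reverse, scan_length, List.length_reverse]; exact hj
  rw [List.getD_eq_getElem _ _ hl]
  refine scan_pos f.reverse _ ?_
  have := List.getElem_mem hl
  rwa [List.mem_reverse] at this

theorem LG_zero (f : List Int) (h : f ≠ []) : LG f 0 = 1 := scan_get_zero f h

theorem LG_succ (f : List Int) (i : Nat) (h : i + 1 < f.length) :
    LG f (i + 1) =
      (if f.getD (i + 1) 0 > f.getD i 0 then LG f i + 1
       else if f.getD (i + 1) 0 = f.getD i 0 then LG f i else 1) :=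
  scan_get_succ f none 0 i h

theorem getD_reverse (xs : List Int) (j : Nat) (hj : j < xs.length) :
    xs.reverse.getD j 0 = xs.getD (xs.length - 1 - j) 0 := by
  have h1 : j < xs.reverse.length := by simpa using hj
  have h2 : xs.length - 1 - j < xs.length := by omega
  rw [List.getD_eq_getElem _ _ h1, List.getD_eq_getElem _ _ h2, List.getElem_reverse]

theorem RG_eq (f : List Int) (j : Nat) (hj : j < f.length) :
    RG f j = (scanList none 0 f.reverse).getD (f.length - 1 - j) 0 := by
  unfold RG
  have h := getD_reverse (scanList none 0 f.reverse) j
    (by rw [scan_length, List.length_reverse]; exact hj)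
  rw [h, scan_length, List.length_reverse]

theorem RG_last (f : List Int) (h : f ≠ []) : RG f (f.length - 1) = 1 := by
  have hn : 0 < f.length := List.length_pos_iff.mpr h
  rw [RG_eq f _ (by omega)]
  have e : f.length - 1 - (f.length - 1) = 0 := by omega
  rw [e]
  exact scan_get_zero f.reverse (by simpa using h)

theorem RG_succ (f : List Int) (i : Nat) (h : i + 1 < f.length) :
    RG f i =
      (if f.getD i 0 > f.getD (i + 1) 0 then RG f (i + 1) + 1
       else if f.getD i 0 = f.getD (i + 1) 0 then RG f (i + 1) else 1) := by
  have e1 : f.length - 1 - i = (f.length - 2 - i) + 1 := by omega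
  rw [RG_eq f i (by omega), RG_eq f (i + 1) h, e1]
  have h2 : (f.length - 2 - i) + 1 < f.reverse.length := by
    rw [List.length_reverse]; omega
  rw [scan_get_succ f.reverse none 0 (f.length - 2 - i) h2]
  rw [getD_reverse f _ (by omega), getD_reverse f _ (by omega)]
  have e2 : f.length - 1 - (f.length - 2 - i + 1) = i := by omega
  have e3 : f.length - 1 - (f.length - 2 - i) = i + 1 := by omega
  have e4 : f.length - 1 - (i + 1) = f.length - 2 - i := by omega
  rw [e2, e3, e4]

theorem buildL_getD (f : List Int) (t j : Nat) (hj : j < f.length) :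
    (buildL f t).getD j 0 = if j < t then LG f j else 1 := by
  have hj' : j < (buildL f t).length := by simp [buildL]; exact hj
  rw [List.getD_eq_getElem _ _ hj']
  simp [buildL]

theorem buildM_getD (f : List Int) (t j : Nat) (hj : j < f.length) :
    (buildM f t).getD j 0 = if j < t then LG f j else max (LG f j) (RG f j) := by
  have hj' : j < (buildM f t).length := by simp [buildM]; exact hj
  rw [List.getD_eq_getElem _ _ hj']
  simp [buildM]

theorem set_buildL (f : List Int) (k : Nat) (_hkn : k < f.length) :
    (buildL f k).set k (LG f k) = buildL f (k + 1) := by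
  apply List.ext_getElem
  · simp [buildL]
  · intro j h1 h2
    have hj : j < f.length := by simpa [buildL] using h2
    have hjr : j < (buildL f k).length := by simp [buildL]; exact hj
    rw [List.getElem_set]
    by_cases hjk : k = j
    · subst hjk; simp [buildL]
    · simp only [if_neg hjk]
      simp only [buildL, List.getElem_map, List.getElem_range]
      by_cases hlt : j < k
      · rw [if_pos hlt, if_pos (by omega)]
      · rw [if_neg hlt, if_neg (by omega)]

theorem set_buildM (f : List Int) (i : Nat) (_hin : i < f.length) :
    (buildM f (i + 1)).set i (max (LG f i) (RG f i)) = buildM f i := by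
  apply List.ext_getElem
  · simp [buildM]
  · intro j h1 h2
    have hj : j < f.length := by simpa [buildM] using h2
    rw [List.getElem_set]
    by_cases hji : i = j
    · subst hji; simp [buildM]
    · simp only [if_neg hji]
      simp only [buildM, List.getElem_map, List.getElem_range]
      by_cases hlt : j < i
      · rw [if_pos hlt, if_pos (by omega)]
      · rw [if_neg hlt, if_neg (by omega)]

theorem fwd_step (f : List Int) (k : Nat) (hk1 : 1 ≤ k) (hkn : k < f.length) :
    fwdStep f (buildL f k) (k : Int) = buildL f (k + 1) := by
  unfold fwdStep
  have hc : ((k : Int) - 1) = ((k - 1 : Nat) : Int) := by omega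
  rw [hc]
  simp only [PySem.List.pyGetD_natCast, PySem.List.pySetD_natCast]
  have hL : (buildL f k).getD (k - 1) 0 = LG f (k - 1) := by
    rw [buildL_getD f k (k - 1) (by omega), if_pos (by omega)]
  have hrec := LG_succ f (k - 1) (by omega)
  have hk' : k - 1 + 1 = k := by omega
  rw [hk'] at hrec
  split_ifs with h1 h2
  · rw [if_pos h1] at hrec
    rw [hL, ← hrec]
    exact set_buildL f k hkn
  · rw [if_neg h1, if_pos h2] at hrec
    rw [hL, ← hrec]
    exact set_buildL f k hkn
  · rw [if_neg h1, if_neg h2] at hrec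
    rw [← hrec]
    exact set_buildL f k hkn

theorem bwd_step (f : List Int) (i : Nat) (hin : i + 1 < f.length) :
    bwdStep f (buildM f (i + 1)) (i : Int) = buildM f i := by
  unfold bwdStep
  have hc : ((i : Int) + 1) = ((i + 1 : Nat) : Int) := by omega
  rw [hc]
  simp only [PySem.List.pyGetD_natCast, PySem.List.pySetD_natCast]
  have hRi : (buildM f (i + 1)).getD i 0 = LG f i := by
    rw [buildM_getD f (i + 1) i (by omega), if_pos (by omega)]
  have hRi1 : (buildM f (i + 1)).getD (i + 1) 0 = max (LG f (i + 1)) (RG f (i + 1)) := by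
    rw [buildM_getD f (i + 1) (i + 1) hin, if_neg (by omega)]
  have hLrec := LG_succ f i hin
  have hRrec := RG_succ f i hin
  have hLpos := LG_pos f (i + 1) hin
  have hRpos := RG_pos f (i + 1) hin
  rw [hRi, hRi1]
  split_ifs with h1 h2
  · rw [if_neg (by omega), if_neg (by omega)] at hLrec
    rw [if_pos h1] at hRrec
    have : max (LG f i) (max (LG f (i + 1)) (RG f (i + 1)) + 1) = max (LG f i) (RG f i) := by
      omega
    rw [this]
    exact set_buildM f i (by omega)
  · rw [if_neg (by omega), if_pos (by omega)] at hLrec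
    rw [if_neg h1, if_pos h2] at hRrec
    have : max (LG f i) (max (LG f (i + 1)) (RG f (i + 1))) = max (LG f i) (RG f i) := by
      omega
    rw [this]
    exact set_buildM f i (by omega)
  · rw [if_neg h1, if_neg h2] at hRrec
    have : max (LG f i) 1 = max (LG f i) (RG f i) := by
      have := LG_pos f i (by omega)
      omega
    rw [this]
    exact set_buildM f i (by omega)

theorem fwd_fold (f : List Int) : ∀ (m k : Nat), 1 ≤ k → k + m = f.length →
    (PySem.List.pyRange (k : Int) (f.length : Int) 1).foldl (fwdStep f) (buildL f k) =
      buildL f f.length := by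
  intro m
  induction m with
  | zero =>
    intro k hk he
    have : k = f.length := by omega
    subst this
    rw [PySem.List.pyRange_one_eq_nil (by omega)]
    rfl
  | succ m ih =>
    intro k hk he
    rw [PySem.List.pyRange_one_cons (by exact_mod_cast (by omega : (k : Int) < (f.length : Int)))]
    simp only [List.foldl_cons]
    rw [fwd_step f k hk (by omega)]
    have hc : ((k : Int) + 1) = ((k + 1 : Nat) : Int) := by omega
    rw [hc]
    exact ih (k + 1) (by omega) (by omega)

theorem bwd_fold (f : List Int) : ∀ (i : Nat), i + 2 ≤ f.length →
    (PySem.List.pyRange (i : Int) (-1) (-1)).foldl (bwdStep f) (buildM f (i + 1)) =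
      buildM f 0 := by
  intro i
  induction i with
  | zero =>
    intro h
    rw [show ((0 : Nat) : Int) = 0 from rfl]
    rw [PySem.List.pyRange_neg_one_cons (by omega : (-1 : Int) < 0)]
    rw [PySem.List.pyRange_neg_one_eq_nil (by omega)]
    simp only [List.foldl_cons, List.foldl_nil]
    have := bwd_step f 0 (by omega)
    simpa using this
  | succ i ih =>
    intro h
    rw [PySem.List.pyRange_neg_one_cons (by exact_mod_cast (by omega : (-1 : Int) < ((i + 1 : Nat) : Int)))]
    simp only [List.foldl_cons]
    rw [bwd_step f (i + 1) (by omega)]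
    have hc : ((i + 1 : Nat) : Int) - 1 = (i : Int) := by omega
    rw [hc]
    exact ih (by omega)

theorem replicate_eq_buildL (f : List Int) : List.replicate f.length (1 : Int) = buildL f 1 := by
  apply List.ext_getElem
  · simp [buildL]
  · intro j h1 h2
    have hj : j < f.length := by simpa using h1
    simp only [List.getElem_replicate, buildL, List.getElem_map, List.getElem_range]
    by_cases hj0 : j < 1
    · rw [if_pos hj0]
      have : j = 0 := by omega
      subst this
      rw [LG_zero f (by rw [← List.length_pos_iff]; omega)]
    · rw [if_neg hj0]

theorem buildL_top (f : List Int) (h : f ≠ []) :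
    buildL f f.length = buildM f (f.length - 1) := by
  have hn : 0 < f.length := List.length_pos_iff.mpr h
  apply List.ext_getElem
  · simp [buildL, buildM]
  · intro j h1 h2
    have hj : j < f.length := by simpa [buildL] using h1
    simp only [buildL, buildM, List.getElem_map, List.getElem_range]
    rw [if_pos hj]
    by_cases hlt : j < f.length - 1
    · rw [if_pos hlt]
    · rw [if_neg hlt]
      have : j = f.length - 1 := by omega
      subst this
      have := RG_last f h
      have := LG_pos f (f.length - 1) (by omega)
      omega

theorem A_eq_buildM (f : List Int) (h : f ≠ []) : assignAlgorithms f = buildM f 0 := by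
  have hn : 0 < f.length := List.length_pos_iff.mpr h
  unfold assignAlgorithms
  simp only []
  rw [replicate_eq_buildL]
  rcases Nat.lt_or_ge f.length 2 with h1 | h2
  · have hl1 : f.length = 1 := by omega
    rw [hl1]
    rw [show ((1 : Nat) : Int) = 1 from rfl]
    rw [PySem.List.pyRange_one_eq_nil (by omega)]
    rw [PySem.List.pyRange_neg_one_eq_nil (by omega)]
    simp only [List.foldl_nil]
    have := buildL_top f h
    rw [hl1] at this
    simpa [hl1] using this
  · have hff := fwd_fold f (f.length - 1) 1 le_rfl (by omega)
    simp only [Nat.cast_one] at hff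
    rw [hff]
    rw [buildL_top f h]
    have hc2 : ((f.length : Int) - 2) = ((f.length - 2 : Nat) : Int) := by omega
    have he : f.length - 1 = (f.length - 2) + 1 := by omega
    rw [hc2, he, bwd_fold f (f.length - 2) (by omega)]

-- ---- B-side: structure of startsOf ----

def runEnd (f : List Int) (k : Nat) : Nat :=
  if k + 1 < (startsOf f).length then (startsOf f).getD (k + 1) 0 - 1 else f.length - 1

def runVal (f : List Int) (k : Nat) : Int := f.getD ((startsOf f).getD k 0) 0

def measure_ (f : List Int) (k : Nat) : Nat :=
  (startsOf f).countP (fun s => decide (f.getD s 0 < runVal f k))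

def Rv (f : List Int) (k : Nat) : Int :=
  max (LG f ((startsOf f).getD k 0)) (RG f (runEnd f k))

theorem starts_sorted (f : List Int) : (startsOf f).Pairwise (· < ·) := by
  exact List.Pairwise.filter _ List.pairwise_lt_range

theorem mem_startsOf (f : List Int) (j : Nat) :
    j ∈ startsOf f ↔ j < f.length ∧ isStart f j = true := by
  simp [startsOf, List.mem_filter, List.mem_range]

theorem starts_zero (f : List Int) (h : 0 < f.length) : (startsOf f).getD 0 0 = 0 := by
  have h0 : 0 ∈ startsOf f := by
    rw [mem_startsOf]; exact ⟨h, by simp [isStart]⟩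
  have hp := starts_sorted f
  cases hS : startsOf f with
  | nil => rw [hS] at h0; simp at h0
  | cons a tl =>
    rw [hS] at h0 hp
    rcases List.mem_cons.mp h0 with h1 | h1
    · simp [← h1]
    · have := (List.pairwise_cons.mp hp).1 0 h1
      omega

theorem starts_get_lt (f : List Int) (a b : Nat) (hab : a < b) (hb : b < (startsOf f).length) :
    (startsOf f).getD a 0 < (startsOf f).getD b 0 := by
  have ha : a < (startsOf f).length := by omega
  rw [List.getD_eq_getElem _ _ ha, List.getD_eq_getElem _ _ hb]
  exact List.pairwise_iff_getElem.mp (starts_sorted f) a b ha hb hab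

theorem starts_get_mem (f : List Int) (k : Nat) (hk : k < (startsOf f).length) :
    (startsOf f).getD k 0 ∈ startsOf f := by
  rw [List.getD_eq_getElem _ _ hk]
  exact List.getElem_mem hk

theorem starts_idx_of_mem (f : List Int) (j : Nat) (hj : j ∈ startsOf f) :
    ∃ t, t < (startsOf f).length ∧ (startsOf f).getD t 0 = j := by
  rcases List.getElem_of_mem hj with ⟨t, ht, hget⟩
  exact ⟨t, ht, by rw [List.getD_eq_getElem _ _ ht]; exact hget⟩

theorem runEnd_lt (f : List Int) (k : Nat) (hn : 0 < f.length) : runEnd f k < f.length := by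
  unfold runEnd
  split_ifs with h
  · have := starts_get_mem f (k + 1) h
    rw [mem_startsOf] at this
    omega
  · omega

theorem s_le_runEnd (f : List Int) (k : Nat) (hk : k < (startsOf f).length) :
    (startsOf f).getD k 0 ≤ runEnd f k := by
  unfold runEnd
  split_ifs with h
  · have := starts_get_lt f k (k + 1) (by omega) h
    omega
  · have := starts_get_mem f k hk
    rw [mem_startsOf] at this
    omega

theorem no_start_in_run (f : List Int) (k : Nat) (hk : k < (startsOf f).length)
    (j : Nat) (h1 : (startsOf f).getD k 0 < j) (h2 : j ≤ runEnd f k) :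
    isStart f j = false := by
  by_contra hb
  have hb' : isStart f j = true := by
    cases hj : isStart f j
    · exact absurd hj hb
    · rfl
  have hn : 0 < f.length := by
    have := starts_get_mem f k hk
    rw [mem_startsOf] at this
    omega
  have hjn : j < f.length := by
    have := runEnd_lt f k hn
    omega
  have hjm : j ∈ startsOf f := (mem_startsOf f j).mpr ⟨hjn, hb'⟩
  rcases starts_idx_of_mem f j hjm with ⟨t, ht, hget⟩
  -- strict sortedness: S k < S t = j forces k < t
  have hkt : k < t := by
    by_contra hle
    rcases Nat.eq_or_lt_of_le (Nat.le_of_not_lt hle) with hEq | hLt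
    · rw [hEq] at hget; omega
    · have := starts_get_lt f t k hLt hk
      omega
  unfold runEnd at h2
  by_cases hk1 : k + 1 < (startsOf f).length
  · rw [if_pos hk1] at h2
    have hkk1 : (startsOf f).getD k 0 < (startsOf f).getD (k + 1) 0 :=
      starts_get_lt f k (k + 1) (by omega) hk1
    -- j < S (k+1), so t < k+1, contradiction with k < t
    have htk1 : t < k + 1 := by
      by_contra hge
      rcases Nat.eq_or_lt_of_le (Nat.le_of_not_lt hge) with hEq | hLt
      · rw [← hEq] at hget; omega
      · have := starts_get_lt f (k + 1) t hLt ht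
        omega
    omega
  · -- t < length ≤ k + 1 and k < t: impossible
    omega

theorem not_start_eq (f : List Int) (j : Nat) (hj : isStart f j = false) :
    f.getD j 0 = f.getD (j - 1) 0 ∧ 0 < j := by
  unfold isStart at hj
  simp only [Bool.or_eq_false_iff, beq_eq_false_iff_ne, decide_eq_false_iff_not] at hj
  refine ⟨by omega, by omega⟩

theorem f_const_run (f : List Int) (k : Nat) (hk : k < (startsOf f).length)
    (j : Nat) (h1 : (startsOf f).getD k 0 ≤ j) (h2 : j ≤ runEnd f k) :
    f.getD j 0 = f.getD ((startsOf f).getD k 0) 0 := by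
  -- induction on the offset j - S k
  have key : ∀ d, (startsOf f).getD k 0 + d ≤ runEnd f k →
      f.getD ((startsOf f).getD k 0 + d) 0 = f.getD ((startsOf f).getD k 0) 0 := by
    intro d
    induction d with
    | zero => intro _; rfl
    | succ d ih =>
      intro hd
      have hns := no_start_in_run f k hk ((startsOf f).getD k 0 + (d + 1)) (by omega) hd
      have := (not_start_eq f _ hns).1
      have e : (startsOf f).getD k 0 + (d + 1) - 1 = (startsOf f).getD k 0 + d := by omega
      rw [e] at this
      rw [this]
      exact ih (by omega)
  have e : j = (startsOf f).getD k 0 + (j - (startsOf f).getD k 0) := by omega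
  rw [e]
  exact key _ (by omega)

theorem LG_const_run (f : List Int) (k : Nat) (hk : k < (startsOf f).length) (hn : 0 < f.length)
    (j : Nat) (h1 : (startsOf f).getD k 0 ≤ j) (h2 : j ≤ runEnd f k) :
    LG f j = LG f ((startsOf f).getD k 0) := by
  have key : ∀ d, (startsOf f).getD k 0 + d ≤ runEnd f k →
      LG f ((startsOf f).getD k 0 + d) = LG f ((startsOf f).getD k 0) := by
    intro d
    induction d with
    | zero => intro _; rfl
    | succ d ih =>
      intro hd
      have hd' : (startsOf f).getD k 0 + d + 1 ≤ runEnd f k := by omega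
      have hlt : (startsOf f).getD k 0 + d + 1 < f.length := by
        have := runEnd_lt f k hn; omega
      have hns := no_start_in_run f k hk ((startsOf f).getD k 0 + d + 1) (by omega) hd'
      have heq := (not_start_eq f _ hns).1
      have e : (startsOf f).getD k 0 + d + 1 - 1 = (startsOf f).getD k 0 + d := by omega
      rw [e] at heq
      have hrec := LG_succ f ((startsOf f).getD k 0 + d) hlt
      rw [if_neg (by omega), if_pos heq] at hrec
      rw [show (startsOf f).getD k 0 + (d + 1) = (startsOf f).getD k 0 + d + 1 from by omega]
      rw [hrec]
      exact ih (by omega)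
  have e : j = (startsOf f).getD k 0 + (j - (startsOf f).getD k 0) := by omega
  rw [e]
  exact key _ (by omega)

theorem RG_const_run (f : List Int) (k : Nat) (hk : k < (startsOf f).length) (hn : 0 < f.length)
    (j : Nat) (h1 : (startsOf f).getD k 0 ≤ j) (h2 : j ≤ runEnd f k) :
    RG f j = RG f (runEnd f k) := by
  -- downward induction: distance to runEnd
  have key : ∀ d, (startsOf f).getD k 0 ≤ runEnd f k - d →
      RG f (runEnd f k - d) = RG f (runEnd f k) := by
    intro d
    induction d with
    | zero => intro _; rfl
    | succ d ih =>
      intro hd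
      by_cases hz : runEnd f k ≤ d
      · have e : runEnd f k - (d + 1) = runEnd f k - d := by omega
        rw [e]; exact ih (by omega)
      · have hlt : runEnd f k - (d + 1) + 1 < f.length := by
          have := runEnd_lt f k hn; omega
        have hns := no_start_in_run f k hk (runEnd f k - (d + 1) + 1) (by omega) (by omega)
        have heq := (not_start_eq f _ hns).1
        have e : runEnd f k - (d + 1) + 1 - 1 = runEnd f k - (d + 1) := by omega
        rw [e] at heq
        have hrec := RG_succ f (runEnd f k - (d + 1)) hlt
        rw [if_neg (by omega), if_pos (by omega)] at hrec
        rw [hrec]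
        have e2 : runEnd f k - (d + 1) + 1 = runEnd f k - d := by omega
        rw [e2]
        exact ih (by omega)
  have e : j = runEnd f k - (runEnd f k - j) := by omega
  rw [e]
  exact key _ (by omega)

theorem k_pos_of_s_pos (f : List Int) (k : Nat) (hk : k < (startsOf f).length)
    (hs : 0 < (startsOf f).getD k 0) : 0 < k := by
  by_contra h
  have : k = 0 := by omega
  subst this
  have hn : 0 < f.length := by
    have := starts_get_mem f 0 hk
    rw [mem_startsOf] at this
    omega
  rw [starts_zero f hn] at hs
  omega

theorem cond2_k1_lt (f : List Int) (k : Nat) (hk : k < (startsOf f).length) (hn : 0 < f.length)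
    (h : runEnd f k + 1 < f.length) : k + 1 < (startsOf f).length := by
  by_contra hc
  have he : runEnd f k = f.length - 1 := by
    unfold runEnd; rw [if_neg hc]
  omega

theorem LG_start (f : List Int) (k : Nat) (hk : k < (startsOf f).length) (hn : 0 < f.length) :
    LG f ((startsOf f).getD k 0) =
      if 0 < (startsOf f).getD k 0 ∧
          f.getD ((startsOf f).getD k 0 - 1) 0 < f.getD ((startsOf f).getD k 0) 0 then
        Rv f (k - 1) + 1
      else 1 := by
  split_ifs with hc
  · obtain ⟨hs, hr⟩ := hc
    have hk0 : 0 < k := k_pos_of_s_pos f k hk hs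
    have hsn : (startsOf f).getD k 0 < f.length := by
      have := starts_get_mem f k hk; rw [mem_startsOf] at this; omega
    set s := (startsOf f).getD k 0 with hsdef
    -- run k-1 ends exactly at s - 1
    have hE : runEnd f (k - 1) = s - 1 := by
      unfold runEnd
      rw [if_pos (by omega)]
      rw [show k - 1 + 1 = k from by omega]
    have hSk1 : (startsOf f).getD (k - 1) 0 ≤ s - 1 := by
      have := starts_get_lt f (k - 1) k (by omega) hk
      omega
    -- LG at s via LG_succ at s-1
    have hrec := LG_succ f (s - 1) (by omega)
    rw [show s - 1 + 1 = s from by omega] at hrec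
    rw [if_pos hr] at hrec
    -- RG (s-1) = 1 since the next comparison is a rise
    have hRG := RG_succ f (s - 1) (by omega)
    rw [show s - 1 + 1 = s from by omega] at hRG
    rw [if_neg (by omega), if_neg (by omega)] at hRG
    have hLc : LG f (s - 1) = LG f ((startsOf f).getD (k - 1) 0) :=
      LG_const_run f (k - 1) (by omega) hn (s - 1) hSk1 (by omega)
    have hRc : RG f (s - 1) = RG f (runEnd f (k - 1)) := by rw [hE]
    have hLpos : 1 ≤ LG f (s - 1) := LG_pos f (s - 1) (by omega)
    unfold Rv
    rw [← hLc, ← hRc, hRG, hrec, hLc]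
    omega
  · -- either s = 0, or a strict fall into s
    have hsn : (startsOf f).getD k 0 < f.length := by
      have := starts_get_mem f k hk; rw [mem_startsOf] at this; omega
    by_cases hs : 0 < (startsOf f).getD k 0
    · have hst := starts_get_mem f k hk
      rw [mem_startsOf] at hst
      have hne : f.getD ((startsOf f).getD k 0) 0 ≠ f.getD ((startsOf f).getD k 0 - 1) 0 := by
        have := hst.2
        unfold isStart at this
        simp only [Bool.or_eq_true, beq_iff_eq, decide_eq_true_eq] at this
        rcases this with h | h
        · omega
        · exact h
      have hfall : f.getD ((startsOf f).getD k 0) 0 < f.getD ((startsOf f).getD k 0 - 1) 0 := by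
        rcases lt_trichotomy (f.getD ((startsOf f).getD k 0) 0)
            (f.getD ((startsOf f).getD k 0 - 1) 0) with h | h | h
        · exact h
        · exact absurd h hne
        · exact absurd ⟨hs, h⟩ hc
      have hrec := LG_succ f ((startsOf f).getD k 0 - 1) (by omega)
      rw [show (startsOf f).getD k 0 - 1 + 1 = (startsOf f).getD k 0 from by omega] at hrec
      rw [if_neg (by omega), if_neg (by omega)] at hrec
      exact hrec
    · have : (startsOf f).getD k 0 = 0 := by omega
      rw [this]
      exact LG_zero f (by rw [← List.length_pos_iff]; omega)

theorem RG_end (f : List Int) (k : Nat) (hk : k < (startsOf f).length) (hn : 0 < f.length) :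
    RG f (runEnd f k) =
      if runEnd f k + 1 < f.length ∧
          f.getD (runEnd f k + 1) 0 < f.getD (runEnd f k) 0 then
        Rv f (k + 1) + 1
      else 1 := by
  split_ifs with hc
  · obtain ⟨he, hr⟩ := hc
    have hk1 : k + 1 < (startsOf f).length := cond2_k1_lt f k hk hn he
    set e := runEnd f k with hedef
    have hE : e = (startsOf f).getD (k + 1) 0 - 1 := by
      rw [hedef]; unfold runEnd; rw [if_pos hk1]
    have hs1pos : 0 < (startsOf f).getD (k + 1) 0 := by
      have := starts_get_lt f k (k + 1) (by omega) hk1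
      omega
    have he1 : e + 1 = (startsOf f).getD (k + 1) 0 := by omega
    have hs1n : (startsOf f).getD (k + 1) 0 < f.length := by
      have := starts_get_mem f (k + 1) hk1; rw [mem_startsOf] at this; omega
    -- RG at e via RG_succ (strict fall)
    have hRrec := RG_succ f e (by omega)
    rw [if_pos (by omega)] at hRrec
    -- LG (e+1) = 1 since the comparison into e+1 is a strict fall
    have hLrec := LG_succ f e (by omega)
    rw [if_neg (by omega), if_neg (by omega)] at hLrec
    -- e+1 is the start of run k+1
    have hRc : RG f (e + 1) = RG f (runEnd f (k + 1)) := by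
      refine RG_const_run f (k + 1) hk1 hn (e + 1) (by omega) ?_
      have := s_le_runEnd f (k + 1) hk1
      omega
    have hRpos : 1 ≤ RG f (e + 1) := RG_pos f (e + 1) (by omega)
    unfold Rv
    rw [← he1, hLrec, ← hRc, hRrec]
    omega
  · set e := runEnd f k with hedef
    by_cases he : e + 1 < f.length
    · -- comparison into e+1 exists but is not a strict fall; e+1 is a start, so it is a strict rise
      have hk1 : k + 1 < (startsOf f).length := cond2_k1_lt f k hk hn he
      have hE : e = (startsOf f).getD (k + 1) 0 - 1 := by
        rw [hedef]; unfold runEnd; rw [if_pos hk1]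
      have hs1pos : 0 < (startsOf f).getD (k + 1) 0 := by
        have := starts_get_lt f k (k + 1) (by omega) hk1
        omega
      have he1 : e + 1 = (startsOf f).getD (k + 1) 0 := by omega
      have hst := starts_get_mem f (k + 1) hk1
      rw [mem_startsOf] at hst
      have hne : f.getD (e + 1) 0 ≠ f.getD e 0 := by
        have := hst.2
        unfold isStart at this
        simp only [Bool.or_eq_true, beq_iff_eq, decide_eq_true_eq] at this
        rcases this with h | h
        · omega
        · rw [he1]
          rw [show (startsOf f).getD (k + 1) 0 - 1 = e from by omega] at h
          exact h
      have hrise : f.getD e 0 < f.getD (e + 1) 0 := by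
        rcases lt_trichotomy (f.getD (e + 1) 0) (f.getD e 0) with h | h | h
        · exact absurd ⟨he, h⟩ hc
        · exact absurd h hne
        · exact h
      have hRrec := RG_succ f e (by omega)
      rw [if_neg (by omega), if_neg (by omega)] at hRrec
      exact hRrec
    · -- e is the last index
      have hE : e = f.length - 1 := by
        have := runEnd_lt f k hn
        omega
      rw [hE]
      exact RG_last f (by rw [← List.length_pos_iff]; omega)

theorem countP_lt {α : Type} (l : List α) (p q : α → Bool) (h : ∀ a ∈ l, p a = true → q a = true)
    (x : α) (hx : x ∈ l) (hq : q x = true) (hp : ¬ p x = true) :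
    l.countP p < l.countP q := by
  induction l with
  | nil => simp at hx
  | cons a l ih =>
    rcases List.mem_cons.mp hx with hEq | hMem
    · subst hEq
      have h1 : (if p x = true then 1 else 0) = 0 := by rw [if_neg hp]
      have h2 : (if q x = true then 1 else 0) = 1 := by rw [if_pos hq]
      rw [List.countP_cons, List.countP_cons, h1, h2]
      have hle : l.countP p ≤ l.countP q :=
        List.countP_mono_left (fun a ha => h a (List.mem_cons_of_mem _ ha))
      omega
    · rw [List.countP_cons, List.countP_cons]
      have hlt := ih (fun b hb => h b (List.mem_cons_of_mem _ hb)) hMem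
      have : (if p a = true then 1 else 0) ≤ (if q a = true then 1 else 0) := by
        split_ifs with h1 h2
        · omega
        · exact absurd (h a List.mem_cons_self h1) h2
        · omega
        · omega
      omega

theorem measure_lt_left (f : List Int) (k : Nat) (hk : k < (startsOf f).length)
    (hs : 0 < (startsOf f).getD k 0)
    (hr : f.getD ((startsOf f).getD k 0 - 1) 0 < f.getD ((startsOf f).getD k 0) 0) :
    measure_ f (k - 1) < measure_ f k := by
  have hk0 : 0 < k := k_pos_of_s_pos f k hk hs
  have hE : runEnd f (k - 1) = (startsOf f).getD k 0 - 1 := by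
    unfold runEnd
    rw [if_pos (by omega), show k - 1 + 1 = k from by omega]
  have hval : runVal f (k - 1) = f.getD ((startsOf f).getD k 0 - 1) 0 := by
    unfold runVal
    exact (f_const_run f (k - 1) (by omega) ((startsOf f).getD k 0 - 1)
      (by have := starts_get_lt f (k - 1) k (by omega) hk; omega) (by omega)).symm
  have hvlt : runVal f (k - 1) < runVal f k := by
    rw [hval]
    unfold runVal
    exact hr
  unfold measure_
  refine countP_lt (startsOf f) _ _ ?_ ((startsOf f).getD (k - 1) 0) ?_ ?_ ?_
  · intro a _ hpa
    simp only [decide_eq_true_eq] at hpa ⊢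
    omega
  · exact starts_get_mem f (k - 1) (by omega)
  · simp only [decide_eq_true_eq]
    show f.getD ((startsOf f).getD (k - 1) 0) 0 < runVal f k
    exact hvlt
  · simp only [decide_eq_true_eq]
    show ¬ f.getD ((startsOf f).getD (k - 1) 0) 0 < runVal f (k - 1)
    unfold runVal
    omega

theorem measure_lt_right (f : List Int) (k : Nat) (hk : k < (startsOf f).length) (hn : 0 < f.length)
    (he : runEnd f k + 1 < f.length)
    (hr : f.getD (runEnd f k + 1) 0 < f.getD (runEnd f k) 0) :
    measure_ f (k + 1) < measure_ f k := by
  have hk1 : k + 1 < (startsOf f).length := cond2_k1_lt f k hk hn he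
  have hs1pos : 0 < (startsOf f).getD (k + 1) 0 := by
    have := starts_get_lt f k (k + 1) (by omega) hk1
    omega
  have hE : runEnd f k = (startsOf f).getD (k + 1) 0 - 1 := by
    unfold runEnd; rw [if_pos hk1]
  have he1 : runEnd f k + 1 = (startsOf f).getD (k + 1) 0 := by omega
  have hvalk : runVal f k = f.getD (runEnd f k) 0 := by
    unfold runVal
    have := f_const_run f k hk (runEnd f k) (s_le_runEnd f k hk) (le_refl _)
    rw [this]
  have hvlt : runVal f (k + 1) < runVal f k := by
    unfold runVal
    rw [← he1]
    show f.getD (runEnd f k + 1) 0 < f.getD ((startsOf f).getD k 0) 0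
    have := hvalk
    unfold runVal at this
    omega
  unfold measure_
  refine countP_lt (startsOf f) _ _ ?_ ((startsOf f).getD (k + 1) 0) ?_ ?_ ?_
  · intro a _ hpa
    simp only [decide_eq_true_eq] at hpa ⊢
    omega
  · exact starts_get_mem f (k + 1) hk1
  · simp only [decide_eq_true_eq]
    show f.getD ((startsOf f).getD (k + 1) 0) 0 < runVal f k
    exact hvlt
  · simp only [decide_eq_true_eq]
    show ¬ f.getD ((startsOf f).getD (k + 1) 0) 0 < runVal f (k + 1)
    unfold runVal
    omega

theorem measure_lt_len (f : List Int) (k : Nat) (hk : k < (startsOf f).length) :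
    measure_ f k < (startsOf f).length := by
  unfold measure_
  calc (startsOf f).countP (fun s => decide (f.getD s 0 < runVal f k))
      < (startsOf f).countP (fun _ => true) := by
        refine countP_lt (startsOf f) _ _ (fun a _ _ => rfl) ((startsOf f).getD k 0)
          (starts_get_mem f k hk) rfl ?_
        simp only [decide_eq_true_eq]
        show ¬ f.getD ((startsOf f).getD k 0) 0 < runVal f k
        unfold runVal
        omega
    _ = (startsOf f).length := by rw [List.countP_true]

theorem levelF_succ (f : List Int) (fuel k : Nat) :
    levelF f (startsOf f) (fuel + 1) k =
      (if runEnd f k + 1 < f.length ∧ f.getD (runEnd f k + 1) 0 < f.getD (runEnd f k) 0 then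
        max (if 0 < (startsOf f).getD k 0 ∧
              f.getD ((startsOf f).getD k 0 - 1) 0 < f.getD ((startsOf f).getD k 0) 0 then
            levelF f (startsOf f) fuel (k - 1) + 1 else 1)
          (levelF f (startsOf f) fuel (k + 1) + 1)
      else
        (if 0 < (startsOf f).getD k 0 ∧
              f.getD ((startsOf f).getD k 0 - 1) 0 < f.getD ((startsOf f).getD k 0) 0 then
            levelF f (startsOf f) fuel (k - 1) + 1 else 1)) := rfl

theorem levelF_eq_Rv (f : List Int) : ∀ (fuel k : Nat), k < (startsOf f).length →
    measure_ f k < fuel → levelF f (startsOf f) fuel k = Rv f k := by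
  intro fuel
  induction fuel with
  | zero => intro k _ hm; omega
  | succ fuel ih =>
    intro k hk hm
    have hn : 0 < f.length := by
      have := starts_get_mem f k hk; rw [mem_startsOf] at this; omega
    have hsn : (startsOf f).getD k 0 < f.length := by
      have := starts_get_mem f k hk; rw [mem_startsOf] at this; omega
    rw [levelF_succ]
    have hLG := LG_start f k hk hn
    have hRG := RG_end f k hk hn
    have hv : (if 0 < (startsOf f).getD k 0 ∧
          f.getD ((startsOf f).getD k 0 - 1) 0 < f.getD ((startsOf f).getD k 0) 0 then
        levelF f (startsOf f) fuel (k - 1) + 1 else 1) = LG f ((startsOf f).getD k 0) := by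
      by_cases c1 : 0 < (startsOf f).getD k 0 ∧
          f.getD ((startsOf f).getD k 0 - 1) 0 < f.getD ((startsOf f).getD k 0) 0
      · rw [if_pos c1] at hLG ⊢
        rw [ih (k - 1) (by omega) (by
          have := measure_lt_left f k hk c1.1 c1.2
          omega)]
        omega
      · rw [if_neg c1] at hLG ⊢
        omega
    rw [hv]
    by_cases c2 : runEnd f k + 1 < f.length ∧
        f.getD (runEnd f k + 1) 0 < f.getD (runEnd f k) 0
    · rw [if_pos c2] at hRG ⊢
      rw [ih (k + 1) (cond2_k1_lt f k hk hn c2.1) (by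
        have := measure_lt_right f k hk hn c2.1 c2.2
        omega), ← hRG]
      unfold Rv
      rfl
    · rw [if_neg c2] at hRG ⊢
      unfold Rv
      have := LG_pos f ((startsOf f).getD k 0) hsn
      omega

-- ---- B-side: the output fold ----

def cntS (f : List Int) (t : Nat) : Nat := ((List.range t).filter (fun j => isStart f j)).length

theorem cntS_succ (f : List Int) (t : Nat) :
    cntS f (t + 1) = cntS f t + (if isStart f t then 1 else 0) := by
  unfold cntS
  rw [List.range_succ, List.filter_append, List.length_append]
  congr 1
  by_cases h : isStart f t
  · rw [if_pos h]
    simp [List.filter, h]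
  · rw [if_neg h]
    simp [List.filter, h]

theorem cntS_pos (f : List Int) (t : Nat) : 1 ≤ cntS f (t + 1) := by
  unfold cntS
  have h0 : 0 ∈ (List.range (t + 1)).filter (fun j => isStart f j) := by
    rw [List.mem_filter]
    exact ⟨List.mem_range.mpr (by omega), by simp [isStart]⟩
  exact List.length_pos_of_mem h0

theorem alt_eq_map (f : List Int) :
    assignAlgorithms_alt f =
      (List.range f.length).map
        (fun i => levelF f (startsOf f) (startsOf f).length (cntS f (i + 1) - 1)) := by
  have key : ∀ t,
      (List.range t).foldl
        (fun (st : Int × List Int) i =>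
          let k : Int := if isStart f i then st.1 + 1 else st.1
          (k, st.2 ++ [levelF f (startsOf f) (startsOf f).length k.toNat]))
        ((-1 : Int), ([] : List Int))
      = ((cntS f t : Int) - 1,
         (List.range t).map
           (fun i => levelF f (startsOf f) (startsOf f).length (cntS f (i + 1) - 1))) := by
    intro t
    induction t with
    | zero => simp [cntS]
    | succ t ih =>
      rw [List.range_succ, List.foldl_append, ih]
      simp only [List.foldl_cons, List.foldl_nil]
      rw [List.map_append]
      have hs := cntS_succ f t
      have hp := cntS_pos f t
      have hk : (if isStart f t then ((cntS f t : Int) - 1) + 1 else ((cntS f t : Int) - 1))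
          = (cntS f (t + 1) : Int) - 1 := by
        by_cases h : isStart f t
        · rw [if_pos h]; rw [if_pos h] at hs; push_cast [hs]; ring
        · rw [if_neg h]; rw [if_neg h] at hs; omega
      have hkt : (if isStart f t then ((cntS f t : Int) - 1) + 1 else ((cntS f t : Int) - 1)).toNat
          = cntS f (t + 1) - 1 := by
        rw [hk]; omega
      rw [Prod.mk.injEq]
      constructor
      · exact hk
      · rw [hkt]
        simp
  have hdef : assignAlgorithms_alt f
      = ((List.range f.length).foldl
          (fun (st : Int × List Int) i =>
            let k : Int := if isStart f i then st.1 + 1 else st.1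
            (k, st.2 ++ [levelF f (startsOf f) (startsOf f).length k.toNat]))
          ((-1 : Int), ([] : List Int))).2 := rfl
  rw [hdef, key f.length]

theorem runidx_spec (f : List Int) (i : Nat) (hi : i < f.length) :
    cntS f (i + 1) - 1 < (startsOf f).length ∧
    (startsOf f).getD (cntS f (i + 1) - 1) 0 ≤ i ∧
    i ≤ runEnd f (cntS f (i + 1) - 1) := by
  have hr : List.range f.length = List.range (i + 1) ++ List.range' (i + 1) (f.length - (i + 1)) := by
    rw [List.range_eq_range', List.range_eq_range' (n := i + 1)]
    have h := List.range'_append (s := 0) (m := i + 1) (n := f.length - (i + 1)) (step := 1)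
    rw [show 0 + 1 * (i + 1) = i + 1 from by omega,
      show (i + 1) + (f.length - (i + 1)) = f.length from by omega] at h
    exact h.symm
  have hsplit : startsOf f
      = (List.range (i + 1)).filter (fun j => isStart f j)
        ++ (List.range' (i + 1) (f.length - (i + 1))).filter (fun j => isStart f j) := by
    unfold startsOf
    rw [hr, List.filter_append]
  set A := (List.range (i + 1)).filter (fun j => isStart f j) with hA
  set B := (List.range' (i + 1) (f.length - (i + 1))).filter (fun j => isStart f j) with hB
  have hlenA : cntS f (i + 1) = A.length := rfl
  have hApos : 0 < A.length := by rw [← hlenA]; exact cntS_pos f i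
  have hlen : (startsOf f).length = A.length + B.length := by
    rw [hsplit, List.length_append]
  set k := cntS f (i + 1) - 1 with hkdef
  have hkA : k < A.length := by omega
  have hkm : k < (startsOf f).length := by omega
  have hgk : (startsOf f).getD k 0 = A[k]'hkA := by
    rw [List.getD_eq_getElem _ _ hkm]
    have : (startsOf f)[k]'hkm = (A ++ B)[k]'(by rw [← hsplit]; exact hkm) := by
      congr 1
    rw [this, List.getElem_append_left hkA]
  have hAle : ∀ x, x ∈ A → x ≤ i := by
    intro x hx
    rw [hA, List.mem_filter, List.mem_range] at hx
    omega
  have hAk_le : A[k]'hkA ≤ i := hAle _ (List.getElem_mem hkA)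
  refine ⟨hkm, by rw [hgk]; exact hAk_le, ?_⟩
  unfold runEnd
  split_ifs with h
  · -- S (k+1) = B[0] ≥ i + 1
    have hk1 : A.length ≤ k + 1 := by omega
    have hBpos : 0 < B.length := by omega
    have hgk1 : (startsOf f).getD (k + 1) 0 = B[0]'hBpos := by
      rw [List.getD_eq_getElem _ _ h]
      have : (startsOf f)[k + 1]'h = (A ++ B)[k + 1]'(by rw [← hsplit]; exact h) := by
        congr 1
      rw [this, List.getElem_append_right hk1]
      congr 1
      omega
    have hBge : ∀ x, x ∈ B → i + 1 ≤ x := by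
      intro x hx
      rw [hB, List.mem_filter, List.mem_range'_1] at hx
      omega
    have hBmem := hBge _ (List.getElem_mem hBpos)
    rw [hgk1]
    omega
  · omega

theorem buildM_zero_eq_alt (f : List Int) : buildM f 0 = assignAlgorithms_alt f := by
  rw [alt_eq_map]
  unfold buildM
  refine List.map_congr_left ?_
  intro j hj
  rw [List.mem_range] at hj
  rw [if_neg (by omega)]
  obtain ⟨hk, hs, he⟩ := runidx_spec f j hj
  have hn : 0 < f.length := by omega
  have hL := LG_const_run f _ hk hn j hs he
  have hR := RG_const_run f _ hk hn j hs he
  rw [levelF_eq_Rv f _ _ hk (measure_lt_len f _ hk)]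
  unfold Rv
  rw [hL, hR]

-- ===== VERDICT (by name: the statement is the Claim_ definition above) =====
theorem assignAlgorithms_spec : Claim_equal_assignAlgorithms := by
  unfold Claim_equal_assignAlgorithms
  intro f _
  unfold Spec_assignAlgorithms
  show assignAlgorithms f = assignAlgorithms_alt f
  by_cases h : f = []
  · subst h
    simp [assignAlgorithms, assignAlgorithms_alt, startsOf,
      PySem.List.pyRange_one_eq_nil, PySem.List.pyRange_neg_one_eq_nil]
  · rw [A_eq_buildM f h, buildM_zero_eq_alt]
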